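-- pv_equiv track=rewrite | github.com/Migorithm/Algorithm | Algorithm(41)_bitconversion.py | solution
-- ===== SOURCE A (Python) =====
-- def solution(n,arr1,arr2):
--     bit = list(map(lambda x,y:bin(x|y)[2:] , arr1,arr2))
--     answer = []
--     for i in bit:
--         while len(i) != n :
--             i = '0' + i
--         str = i.replace('0',' ')
--         str2 = str.replace('1','#')
--         answer.append(str2)
--     return answer
-- ===== SOURCE B (Python) =====
-- def solution(n, arr1, arr2):
--     return [''.join('#' if (a | b) >> j & 1 else ' '
--                     for j in range(n - 1, -1, -1))
--             for a, b in zip(arr1, arr2)]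
-- ===== Notes on version B (the rewrite author's own statement) =====
-- stated objective: idiomatic
-- what changed: B never forms a binary string at all: each row is rendered by direct bit masking, emitting '#' if (a|b)>>j&1 else ' ' for j = n-1..0, replacing A's bin()+slice string, its char-by-char '0'-padding while-loop and its two replace passes.
-- outside the precondition, e.g. on solution(4, [-5], [0]): A returns ['b# #'], B returns ['# ##']
import Mathlib
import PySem

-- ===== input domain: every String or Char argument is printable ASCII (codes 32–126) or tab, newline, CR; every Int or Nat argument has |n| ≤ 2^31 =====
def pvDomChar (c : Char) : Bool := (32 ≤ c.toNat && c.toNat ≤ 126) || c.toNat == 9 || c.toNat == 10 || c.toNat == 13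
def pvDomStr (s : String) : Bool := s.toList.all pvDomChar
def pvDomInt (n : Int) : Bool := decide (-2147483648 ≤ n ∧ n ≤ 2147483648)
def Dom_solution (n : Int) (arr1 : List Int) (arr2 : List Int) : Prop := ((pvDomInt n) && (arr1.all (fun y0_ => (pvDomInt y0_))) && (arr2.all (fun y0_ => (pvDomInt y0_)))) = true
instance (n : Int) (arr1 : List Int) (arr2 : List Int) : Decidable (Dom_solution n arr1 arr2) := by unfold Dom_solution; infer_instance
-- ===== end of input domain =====

-- B renders each row by direct bit masking ((a|b)>>j&1 for j = n-1..0) instead of A's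
-- bin()-string, char-by-char '0'-padding while-loop and two replace passes.

-- ===== PORT A =====
-- Python's `while len(i) != n: i = '0' + i`; the `s.length < n` test is only a
-- termination guard — where Python diverges (length already > n, or n < 0) it never fires.
def padLoop (n : Int) (s : List Char) : List Char :=
  if (s.length : Int) = n then s
  else if (s.length : Int) < n then padLoop n ('0' :: s)
  else s
termination_by n.toNat - s.length
decreasing_by simp only [List.length_cons]; omega

-- str.replace with a one-character pattern and one-character replacement is exactly a
-- character-wise map (every occurrence is a single char, no overlap).
def replChar (old new : Char) (s : List Char) : List Char :=
  s.map (fun c => if c = old then new else c)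

-- the body of A's for-loop: pad, replace '0'->' ', replace '1'->'#'
def rowA (n : Int) (i : List Char) : String :=
  let i' := padLoop n i
  let s1 := replChar '0' ' ' i'
  let s2 := replChar '1' '#' s1
  String.ofList s2

def solution (n : Int) (arr1 : List Int) (arr2 : List Int) : List String :=
  -- bit = list(map(lambda x,y: bin(x|y)[2:], arr1, arr2))  (map truncates to the shorter list)
  let bit := List.zipWith (fun x y => (PySem.Int.toBinChars0b (PySem.Int.bor x y)).drop 2) arr1 arr2
  bit.foldl (fun answer i => answer ++ [rowA n i]) []

-- ===== PORT B =====
-- [''.join('#' if (a|b) >> j & 1 else ' ' for j in range(n-1,-1,-1)) for a, b in zip(arr1, arr2)]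
def solution_alt (n : Int) (arr1 : List Int) (arr2 : List Int) : List String :=
  (arr1.zip arr2).map (fun p =>
    String.ofList ((PySem.List.pyRange (n - 1) (-1) (-1)).map
      (fun j => if PySem.Int.band ((PySem.Int.bor p.1 p.2) >>> j.toNat) 1 = 1 then '#' else ' ')))

-- ===== PRECONDITION & SPEC =====
-- Pre_ admits exactly the zipped pairs on which A's `while len(i) != n` padding loop
-- terminates AND whose OR is nonnegative. The nonnegativity clause excludes inputs A still
-- returns on: for a negative OR, bin()'s '[2:]' slice leaves a literal 'b' and drops the
-- minus sign (e.g. ' b# #'), a corner value no map-rendering specifies, and B's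
-- two's-complement bit rows there are an equally accidental choice.
def Pre_solution (n : Int) (arr1 : List Int) (arr2 : List Int) : Prop :=
  ∀ p ∈ arr1.zip arr2,
    1 ≤ n ∧ 0 ≤ PySem.Int.bor p.1 p.2 ∧
      PySem.Int.bitLength (PySem.Int.bor p.1 p.2) ≤ n.toNat
instance (n : Int) (arr1 : List Int) (arr2 : List Int) : Decidable (Pre_solution n arr1 arr2) := by
  unfold Pre_solution; infer_instance
def pvWitness_solution : Int × List Int × List Int := (2, [1, 2], [2])
def Spec_solution (n : Int) (arr1 : List Int) (arr2 : List Int) (out : List String) : Prop := out = solution_alt n arr1 arr2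
instance (n : Int) (arr1 : List Int) (arr2 : List Int) (out : List String) : Decidable (Spec_solution n arr1 arr2 out) := by unfold Spec_solution; infer_instance

-- ===== CLAIM (what is proved, stated in full; the proofs are below) =====
def Claim_equal_solution : Prop := ∀ (n : Int) (arr1 : List Int) (arr2 : List Int), Dom_solution n arr1 arr2 → Pre_solution n arr1 arr2 → Spec_solution n arr1 arr2 (solution n arr1 arr2)

-- ===== LEMMAS AND PROOFS =====

theorem padLoop_eq (n : Int) (hn : 0 ≤ n) : ∀ (s : List Char), s.length ≤ n.toNat →
    padLoop n s = List.replicate (n.toNat - s.length) '0' ++ s := by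
  intro s hs
  by_cases h : (s.length : Int) = n
  · rw [padLoop, if_pos h]
    have h0 : n.toNat - s.length = 0 := by omega
    simp [h0]
  · have hlt : (s.length : Int) < n := by omega
    rw [padLoop, if_neg h, if_pos hlt,
      padLoop_eq n hn ('0' :: s) (by simp only [List.length_cons]; omega)]
    have h1 : n.toNat - s.length = (n.toNat - ('0' :: s).length) + 1 := by
      simp only [List.length_cons]; omega
    rw [h1, List.replicate_succ', List.append_assoc]
    rfl
termination_by s => n.toNat - s.length
decreasing_by simp only [List.length_cons]; omega

-- the two replace passes compose into one character map
def trChar (c : Char) : Char :=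
  if c = '0' then ' ' else if c = '1' then '#' else c

theorem repl_repl_eq_tr (t : List Char) :
    replChar '1' '#' (replChar '0' ' ' t) = t.map trChar := by
  simp only [replChar, List.map_map]
  apply List.map_congr_left
  intro c _
  by_cases h0 : c = '0' <;> by_cases h1 : c = '1' <;>
    simp [trChar, h0, h1, Function.comp]

-- ---- Nat.toDigits structural lemmas ----

theorem toDigitsCore_acc (b : Nat) : ∀ (f n : Nat) (acc : List Char),
    Nat.toDigitsCore b f n acc = Nat.toDigitsCore b f n [] ++ acc := by
  intro f
  induction f with
  | zero => intro n acc; simp [Nat.toDigitsCore]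
  | succ f ih =>
    intro n acc
    simp only [Nat.toDigitsCore]
    by_cases h : n / b = 0
    · simp [h]
    · rw [if_neg h, if_neg h, ih (n / b) ((n % b).digitChar :: acc),
        ih (n / b) [(n % b).digitChar], List.append_assoc]
      rfl

theorem toDigitsCore_fuel : ∀ (n f f' : Nat), n < f → n < f' →
    Nat.toDigitsCore 2 f n [] = Nat.toDigitsCore 2 f' n [] := by
  intro n
  induction n using Nat.strong_induction_on with
  | _ n ih =>
    intro f f' hf hf'
    match f, f' with
    | f + 1, f' + 1 =>
      simp only [Nat.toDigitsCore]
      by_cases h : n / 2 = 0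
      · simp [h]
      · rw [if_neg h, if_neg h, toDigitsCore_acc, toDigitsCore_acc 2 f',
          ih (n / 2) (by omega) f f' (by omega) (by omega)]

theorem toDigits_two_step (n : Nat) (h : 2 ≤ n) :
    Nat.toDigits 2 n = Nat.toDigits 2 (n / 2) ++ [(n % 2).digitChar] := by
  show Nat.toDigitsCore 2 (n + 1) n [] = Nat.toDigitsCore 2 (n / 2 + 1) (n / 2) [] ++ _
  rw [Nat.toDigitsCore]
  have h2 : n / 2 ≠ 0 := by omega
  rw [if_neg h2, toDigitsCore_acc, toDigitsCore_fuel (n / 2) n (n / 2 + 1) (by omega) (by omega)]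

-- ---- the bit rows of B, as a function of Nat ----

def bits (m w : Nat) : List Char :=
  (List.range m).map (fun k => if (w >>> (m - 1 - k)) &&& 1 = 1 then '#' else ' ')

theorem bits_succ (m w : Nat) :
    bits (m + 1) w = bits m (w / 2) ++ [if w % 2 = 1 then '#' else ' '] := by
  unfold bits
  rw [List.range_succ, List.map_append]
  congr 1
  · apply List.map_congr_left
    intro k hk
    rw [List.mem_range] at hk
    have h1 : m + 1 - 1 - k = 1 + (m - 1 - k) := by omega
    rw [h1, Nat.shiftRight_add w 1 (m - 1 - k), Nat.shiftRight_one]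
  · simp [Nat.and_one_is_mod]

-- main per-row lemma: bit rendering = pad + binary digits through trChar
theorem bits_eq (m : Nat) : ∀ (w : Nat), 1 ≤ m → w < 2 ^ m →
    bits m w = List.replicate (m - (Nat.toDigits 2 w).length) ' '
      ++ (Nat.toDigits 2 w).map trChar := by
  induction m with
  | zero => omega
  | succ m ih =>
    intro w _ hw
    by_cases hm : m = 0
    · subst hm
      interval_cases w <;> decide
    · have hm1 : 1 ≤ m := by omega
      rw [bits_succ]
      by_cases h2 : 2 ≤ w
      · have hdiv : w / 2 < 2 ^ m := by
          have := Nat.pow_succ 2 m ▸ hw; omega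
        rw [ih (w / 2) hm1 hdiv, toDigits_two_step w h2]
        have hlen : (Nat.toDigits 2 (w / 2)).length ≤ m :=
          Nat.toDigits_length 2 (w / 2) m hm1 hdiv
        simp only [List.length_append, List.length_singleton, List.map_append,
          List.map_cons, List.map_nil, ← List.append_assoc]
        congr 2
        · congr 1; omega
        · have : w % 2 = 0 ∨ w % 2 = 1 := by omega
          rcases this with h | h <;> simp [h, trChar, Nat.digitChar]
      · -- w = 0 or 1 : high part is all zeros
        have hz : w / 2 = 0 := by omega
        have hd0 : Nat.toDigits 2 0 = ['0'] := by decide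
        have hrep : List.replicate (m - 1) ' ' ++ [' '] = List.replicate m ' ' := by
          rw [← List.replicate_succ']
          congr 1
          omega
        rw [hz, ih 0 hm1 (Nat.two_pow_pos m), hd0]
        have hw01 : w = 0 ∨ w = 1 := by omega
        rcases hw01 with h | h <;> subst h
        · norm_num [trChar]
          rw [show ([' ', ' '] : List Char) = [' '] ++ [' '] from rfl,
            ← List.append_assoc, hrep]
        · rw [show Nat.toDigits 2 1 = ['1'] from by decide]
          norm_num [trChar]
          rw [show ([' ', '#'] : List Char) = [' '] ++ ['#'] from rfl,
            ← List.append_assoc, hrep]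
          simp

-- per element: A's loop body equals B's bit-masked row
theorem row_eq (n : Int) (v : Int) (hn : 1 ≤ n) (hv : 0 ≤ v)
    (hb : PySem.Int.bitLength v ≤ n.toNat) :
    rowA n ((PySem.Int.toBinChars0b v).drop 2)
      = String.ofList ((PySem.List.pyRange (n - 1) (-1) (-1)).map
          (fun j => if PySem.Int.band (v >>> j.toNat) 1 = 1 then '#' else ' ')) := by
  have hnv : ¬ v < 0 := by omega
  have hslice : (PySem.Int.toBinChars0b v).drop 2 = Nat.toDigits 2 v.toNat := by
    simp [PySem.Int.toBinChars0b, hnv]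
  have hpow : v.toNat < 2 ^ n.toNat := by
    have h1 := PySem.Int.lt_two_pow_bitLength v
    have h2 : (2:Nat) ^ PySem.Int.bitLength v ≤ 2 ^ n.toNat :=
      Nat.pow_le_pow_right (by omega) hb
    omega
  have hlen : (Nat.toDigits 2 v.toNat).length ≤ n.toNat :=
    Nat.toDigits_length 2 v.toNat n.toNat (by omega) hpow
  -- right side = bits n.toNat v.toNat
  have hR : (PySem.List.pyRange (n - 1) (-1) (-1)).map
        (fun j => if PySem.Int.band (v >>> j.toNat) 1 = 1 then '#' else ' ')
      = bits n.toNat v.toNat := by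
    rw [PySem.List.pyRange_neg_one, List.map_map]
    unfold bits
    have hcnt : (n - 1 - (-1)).toNat = n.toNat := by omega
    rw [hcnt]
    apply List.map_congr_left
    intro k hk
    rw [List.mem_range] at hk
    have hj : (n - 1 - (k : Int)).toNat = n.toNat - 1 - k := by omega
    simp only [Function.comp, hj]
    have hv' : v = (v.toNat : Int) := by omega
    have hs : v >>> ((n.toNat - 1 - k : Nat) : Int) = ((v.toNat >>> (n.toNat - 1 - k) : Nat) : Int) := by
      rw [Int.shiftRight_natCast_right, hv']
      simp [Int.natCast_shiftRight]
    rw [hs, show (1 : Int) = ((1 : Nat) : Int) from rfl, PySem.Int.band_natCast]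
    by_cases hbit : v.toNat >>> (n.toNat - 1 - k) &&& 1 = 1
    · simp [hbit]
    · rw [if_neg (by exact_mod_cast hbit), if_neg hbit]
  rw [hR, bits_eq n.toNat v.toNat (by omega) hpow]
  -- left side
  show String.ofList (replChar '1' '#' (replChar '0' ' ' (padLoop n (_)))) = _
  rw [hslice, padLoop_eq n (by omega) _ hlen]
  congr 1
  rw [← repl_repl_eq_tr]
  simp [replChar, List.map_append, List.map_replicate]

theorem foldl_append_map {α β : Type} (f : α → β) :
    ∀ (l : List α) (acc : List β),
      l.foldl (fun ans i => ans ++ [f i]) acc = acc ++ l.map f := by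
  intro l
  induction l with
  | nil => simp
  | cons x tl ih => intro acc; simp [ih]

theorem solution_eq_aux (n : Int) :
    ∀ (arr1 arr2 : List Int), Pre_solution n arr1 arr2 →
      solution n arr1 arr2 = solution_alt n arr1 arr2 := by
  intro arr1
  induction arr1 with
  | nil => intro arr2 _; rfl
  | cons x t ih =>
    intro arr2 hpre
    cases arr2 with
    | nil => rfl
    | cons y t2 =>
      have hp := hpre (x, y) (by simp)
      have htail := ih t2 (fun p hp' => hpre p (by simp [List.zip_cons_cons]; right; exact hp'))
      simp only [solution, solution_alt, foldl_append_map, List.nil_append] at *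
      simp only [List.zipWith_cons_cons, List.zip_cons_cons, List.map_cons]
      rw [row_eq n (PySem.Int.bor x y) hp.1 hp.2.1 hp.2.2, htail]

-- ===== VERDICT (by name: the statement is the Claim_ definition above) =====
theorem solution_spec : Claim_equal_solution := by
  intro n arr1 arr2 _ hpre
  unfold Spec_solution
  exact solution_eq_aux n arr1 arr2 hpre
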